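-- pv_equiv track=rewrite | github.com/isakchoe/TIL | algorithm /programmers/표현가능한이진트리.py | make_binary_num
-- ===== SOURCE A (Python) =====
-- from collections import  deque
--
-- def make_binary_num(num):
--     q = deque()
--     while num != 1:
--         if num%2 == 0:
--             q.appendleft("0")
--         else:
--             q.appendleft("1")
--         num = num//2
--     q.appendleft("1")
--
--     n = 1
--     while True:
--         if len(q) >= 2**n:
--             n+=1
--         else:
--             temp = 2**n -1 - len(q)
--             for _ in range(temp):
--                 q.appendleft("0")
--             break
--
--     return ''.join(q)
-- ===== SOURCE B (Python) =====
-- def make_binary_num(num):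
--     b = bin(num)[2:]
--     length = 1
--     while length < len(b):
--         length = length * 2 + 1
--     return b.zfill(length)
-- ===== Notes on version B (the rewrite author's own statement) =====
-- stated objective: simpler
-- what changed: Replaces the deque bit-collecting loop, the exponent-search loop and the char-appending padding loop with bin() plus one length-doubling loop and zfill.
-- outside the precondition, e.g. on make_binary_num(0): A does not finish within the time limit, B returns '0'
import Mathlib
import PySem

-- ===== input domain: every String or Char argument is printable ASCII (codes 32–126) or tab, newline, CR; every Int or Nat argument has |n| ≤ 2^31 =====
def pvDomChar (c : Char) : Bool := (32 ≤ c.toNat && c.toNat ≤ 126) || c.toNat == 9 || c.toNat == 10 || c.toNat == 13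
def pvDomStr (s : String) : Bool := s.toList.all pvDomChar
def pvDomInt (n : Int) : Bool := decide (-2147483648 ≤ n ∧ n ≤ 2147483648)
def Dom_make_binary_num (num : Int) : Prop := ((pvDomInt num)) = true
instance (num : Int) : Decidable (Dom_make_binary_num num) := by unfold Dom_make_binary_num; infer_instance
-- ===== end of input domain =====

-- B replaces A's three deque loops with bin() plus one length-doubling loop and zfill (objective: simpler).

-- ===== PORT A =====
-- first while loop: prepend num's low bit, num //= 2, until num == 1
-- (Python diverges for num ≤ 0; the guard `num ≤ 1` only makes the recursion total — Pre_ excludes num ≤ 0)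
def pvLoopA (num : Int) (q : List Char) : List Char :=
  if num ≤ 1 then q
  else pvLoopA (PySem.Int.floordiv num 2)
        ((if PySem.Int.mod num 2 = 0 then '0' else '1') :: q)
  termination_by num.toNat
  decreasing_by
    rw [PySem.Int.floordiv_eq_ediv_of_pos (by omega)]
    omega

-- second while loop: find first n with len(q) < 2^n
def pvFindN (len : Nat) (n : Nat) : Nat :=
  if len ≥ 2 ^ n then pvFindN len (n + 1) else n
  termination_by len - n
  decreasing_by
    have : n < 2 ^ n := Nat.lt_two_pow_self
    omega

def make_binary_num (num : Int) : String :=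
  let q := '1' :: pvLoopA num []
  let n := pvFindN q.length 1
  let temp := 2 ^ n - 1 - q.length
  String.ofList (List.replicate temp '0' ++ q)

-- ===== PORT B =====
-- bin(num)[2:] for num ≥ 1: most-significant bit first, built top-down
def pvBin (n : Nat) : List Char :=
  if n < 2 then [if n = 1 then '1' else '0']
  else pvBin (n / 2) ++ [if n % 2 = 1 then '1' else '0']

-- while length < len(b): length = length*2 + 1
def pvGrow (len : Nat) (length : Nat) : Nat :=
  if length < len then pvGrow len (length * 2 + 1) else length
  termination_by len - length

def make_binary_num_alt (num : Int) : String :=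
  let b := pvBin num.toNat
  let length := pvGrow b.length 1
  String.ofList (List.replicate (length - b.length) '0' ++ b)

-- ===== PRECONDITION & SPEC =====
-- Pre_ excludes num ≤ 0, on which Python A loops forever (num//2 never reaches 1)
def Pre_make_binary_num (num : Int) : Prop := 1 ≤ num
instance (num : Int) : Decidable (Pre_make_binary_num num) := by unfold Pre_make_binary_num; infer_instance
def pvWitness_make_binary_num : Int := (5)

def Spec_make_binary_num (num : Int) (out : String) : Prop := out = make_binary_num_alt num
instance (num : Int) (out : String) : Decidable (Spec_make_binary_num num out) := by unfold Spec_make_binary_num; infer_instance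

-- ===== CLAIM (what is proved, stated in full; the proofs are below) =====
def Claim_equal_make_binary_num : Prop := ∀ (num : Int), Dom_make_binary_num num → Pre_make_binary_num num → Spec_make_binary_num num (make_binary_num num)

-- ===== LEMMAS AND PROOFS =====

-- the bit loop of A produces exactly bin(num)[2:] (with the trailing '1' prepended afterwards)
theorem pvLoopA_eq_pvBin (k : Nat) : ∀ (num : Int), num.toNat = k → 1 ≤ num → ∀ (q : List Char),
    '1' :: pvLoopA num q = pvBin num.toNat ++ q := by
  induction k using Nat.strong_induction_on with
  | _ k ih =>
    intro num hk h1 q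
    by_cases h : num ≤ 1
    · have hnum : num = 1 := le_antisymm h h1
      subst hnum
      rw [pvLoopA.eq_def, pvBin.eq_def]
      simp
    · rw [not_le] at h
      have h2 : (2:Int) ≤ num := h
      have hfd : PySem.Int.floordiv num 2 = num / 2 :=
        PySem.Int.floordiv_eq_ediv_of_pos (by omega)
      have hmd : PySem.Int.mod num 2 = num % 2 :=
        PySem.Int.mod_eq_emod_of_pos (by omega)
      have hlt : (num / 2).toNat < k := by omega
      have h1' : 1 ≤ num / 2 := by omega
      rw [pvLoopA.eq_def]
      simp only [if_neg (by omega : ¬ num ≤ 1)]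
      rw [hfd, hmd, ih (num / 2).toNat hlt (num / 2) rfl h1']
      have hbin : pvBin num.toNat
          = pvBin (num.toNat / 2) ++ [if num.toNat % 2 = 1 then '1' else '0'] := by
        rw [pvBin.eq_def]
        simp only [if_neg (by omega : ¬ num.toNat < 2)]
      have hdiv : (num / 2).toNat = num.toNat / 2 := by omega
      have hbit : (if num % 2 = 0 then '0' else '1')
          = (if num.toNat % 2 = 1 then '1' else '0') := by
        rcases Nat.mod_two_eq_zero_or_one num.toNat with h0 | h0
        · rw [if_pos (by omega : num % 2 = 0), if_neg (by omega : ¬ num.toNat % 2 = 1)]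
        · rw [if_neg (by omega : ¬ num % 2 = 0), if_pos h0]
      rw [hbin, hdiv, hbit, List.append_assoc]
      simp

-- A's exponent search and B's length doubling agree: 2^(findN len n) - 1 = grow len (2^n - 1)
theorem pvGrow_eq_pvFindN (len : Nat) : ∀ (fuel n : Nat), len - n ≤ fuel →
    pvGrow len (2 ^ n - 1) = 2 ^ (pvFindN len n) - 1 := by
  intro fuel
  induction fuel with
  | zero =>
    intro n hn
    have hnl : len ≤ n := by omega
    have h2 : ¬ len ≥ 2 ^ n := by
      have : n < 2 ^ n := Nat.lt_two_pow_self
      omega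
    rw [pvGrow, pvFindN, if_neg h2, if_neg (by
      have : n < 2 ^ n := Nat.lt_two_pow_self
      omega)]
  | succ m ih =>
    intro n hn
    rw [pvGrow, pvFindN]
    by_cases h : len ≥ 2 ^ n
    · have h1 : 1 ≤ 2 ^ n := Nat.one_le_two_pow
      rw [if_pos h, if_pos (by omega : 2 ^ n - 1 < len)]
      have : (2 ^ n - 1) * 2 + 1 = 2 ^ (n + 1) - 1 := by
        have : 2 ^ (n + 1) = 2 ^ n * 2 := by ring
        omega
      rw [this]
      apply ih
      have : n < 2 ^ n := Nat.lt_two_pow_self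
      omega
    · have h1 : 1 ≤ 2 ^ n := Nat.one_le_two_pow
      rw [if_neg h, if_neg (by omega : ¬ 2 ^ n - 1 < len)]

-- ===== VERDICT (by name: the statement is the Claim_ definition above) =====
theorem make_binary_num_spec : Claim_equal_make_binary_num := by
  intro num _ hpre
  unfold Spec_make_binary_num make_binary_num make_binary_num_alt
  have hq : '1' :: pvLoopA num [] = pvBin num.toNat ++ [] :=
    pvLoopA_eq_pvBin num.toNat num rfl hpre []
  simp only [List.append_nil] at hq
  have hgrow : pvGrow (pvBin num.toNat).length 1 = 2 ^ (pvFindN (pvBin num.toNat).length 1) - 1 := by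
    have := pvGrow_eq_pvFindN (pvBin num.toNat).length ((pvBin num.toNat).length) 1 (by omega)
    simpa using this
  simp only [hq, hgrow]
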